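-- pv_equiv track=rewrite | github.com/14lclark/AdventOfCode | 2022/day8.py | right_visible
-- ===== SOURCE A (Python) =====
-- def right_visible(grid):
--     visible = []
--     width = len(grid[0])
--     height = len(grid)
--     for row in range(height):
--         highest = -1
--         for col in range(width - 1, -1, -1):
--             if grid[row][col] > highest:
--                 visible.append((row,col))
--                 highest = grid[row][col]
--     return visible
-- ===== SOURCE B (Python) =====
-- def right_visible(grid):
--     width = len(grid[0])
--     result = []
--     for r, row in enumerate(grid):
--         xs = row[:width]
--         # suffix-maximum table floored at -1: suf[c] = max(-1, *xs[c:])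
--         suf = [-1]
--         for v in reversed(xs):
--             suf.append(max(v, suf[-1]))
--         suf.reverse()
--         result.extend((r, c) for c in range(width - 1, -1, -1) if xs[c] > suf[c + 1])
--     return result
-- ===== Notes on version B (the rewrite author's own statement) =====
-- stated objective: alternative
-- what changed: B replaces A's inline running-max accumulator by a precomputed per-row suffix-maximum table (floored at -1) and a declarative filter over the descending columns; same O(w*h) cost.
import Mathlib
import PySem

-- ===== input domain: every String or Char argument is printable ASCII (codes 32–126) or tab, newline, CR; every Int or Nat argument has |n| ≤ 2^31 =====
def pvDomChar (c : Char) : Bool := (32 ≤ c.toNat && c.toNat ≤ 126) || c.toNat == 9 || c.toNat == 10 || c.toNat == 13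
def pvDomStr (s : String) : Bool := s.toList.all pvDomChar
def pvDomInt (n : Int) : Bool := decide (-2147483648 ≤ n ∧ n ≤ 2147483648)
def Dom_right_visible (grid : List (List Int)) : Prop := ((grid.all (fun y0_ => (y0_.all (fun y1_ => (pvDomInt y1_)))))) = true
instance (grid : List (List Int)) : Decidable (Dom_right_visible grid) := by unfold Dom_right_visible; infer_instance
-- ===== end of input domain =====

-- B replaces A's inline running-max scan by a precomputed per-row suffix-maximum table
-- (floored at -1) and a declarative filter over the descending columns; same O(w*h) cost,
-- objective: alternative. Equality of RETURN values is what is proved.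

-- ===== PORT A =====
def right_visible (grid : List (List Int)) : List (Int × Int) :=
  let width : Int := (((PySem.List.pyGet? grid 0).getD []).length : Int)
  let height : Int := (grid.length : Int)
  (PySem.List.pyRange 0 height 1).foldl
    (fun visible row =>
      ((PySem.List.pyRange (width - 1) (-1) (-1)).foldl
        (fun (st : List (Int × Int) × Int) col =>
          if PySem.List.pyGetD (PySem.List.pyGetD grid row []) col 0 > st.2 then
            (st.1 ++ [(row, col)], PySem.List.pyGetD (PySem.List.pyGetD grid row []) col 0)
          else st)
        (visible, -1)).1)
    []

-- ===== PORT B =====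
-- `suf` in Source B is built by appending then reversed once; consing at the front during the
-- same right-to-left pass builds the identical list, so the fold below conses.
def right_visible_alt (grid : List (List Int)) : List (Int × Int) :=
  let width : Int := (((PySem.List.pyGet? grid 0).getD []).length : Int)
  (PySem.List.enumerate grid 0).foldl
    (fun result p =>
      let xs := PySem.List.slice p.2 none (some width)
      let suf := xs.reverse.foldl (fun s v => max v (s.headD (-1)) :: s) [(-1 : Int)]
      result ++ ((PySem.List.pyRange (width - 1) (-1) (-1)).filter
          (fun c => PySem.List.pyGetD xs c 0 > PySem.List.pyGetD suf (c + 1) 0)).map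
          (fun c => (p.1, c)))
    []

-- ===== PRECONDITION & SPEC =====
-- Pre_ excludes exactly the inputs where Python A raises IndexError: the empty grid
-- (grid[0]) and grids with a row shorter than the first row (grid[row][col]).
def Pre_right_visible (grid : List (List Int)) : Prop :=
  grid ≠ [] ∧ ∀ row ∈ grid, (grid.headD []).length ≤ row.length
instance (grid : List (List Int)) : Decidable (Pre_right_visible grid) := by
  unfold Pre_right_visible; infer_instance
def pvWitness_right_visible : List (List Int) := [[3, 0, 3], [2, 5, 1]]

def Spec_right_visible (grid : List (List Int)) (out : List (Int × Int)) : Prop := out = right_visible_alt grid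
instance (grid : List (List Int)) (out : List (Int × Int)) : Decidable (Spec_right_visible grid out) := by unfold Spec_right_visible; infer_instance

-- ===== CLAIM (what is proved, stated in full; the proofs are below) =====
def Claim_equal_right_visible : Prop := ∀ (grid : List (List Int)), Dom_right_visible grid → Pre_right_visible grid → Spec_right_visible grid (right_visible grid)

-- ===== LEMMAS AND PROOFS =====

-- Common midpoint: columns visible scanning the reversed row (rightmost first) with a
-- running floor h, current column c.
def visRev (r : Int) : List Int → Int → Int → List (Int × Int)
  | [], _, _ => []
  | v :: rest, h, c => (if v > h then [(r, c)] else []) ++ visRev r rest (max h v) (c - 1)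


def sufF : List Int → Int → List Int := fun s v => max v (s.headD (-1)) :: s

lemma suf_tail (ws : List Int) : ∀ (a : Int) (t : List Int),
    ws.foldl sufF (a :: t) = ws.foldl sufF [a] ++ t := by
  induction ws with
  | nil => intro a t; simp
  | cons v ws ih =>
    intro a t
    simp only [List.foldl_cons, sufF, List.headD_cons]
    rw [ih (max v a) (a :: t), ih (max v a) [a]]
    simp

lemma suf_len (ws : List Int) : ∀ (a : Int), (ws.foldl sufF [a]).length = ws.length + 1 := by
  induction ws with
  | nil => intro a; simp
  | cons v ws ih =>
    intro a
    simp only [List.foldl_cons, sufF, List.headD_cons]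
    rw [suf_tail ws (max v a) [a]]
    simp [ih]

lemma innerA (r : Int) (xs : List Int) : ∀ (acc : List (Int × Int)) (h : Int),
    ((PySem.List.pyRange ((xs.length : Int) - 1) (-1) (-1)).foldl
      (fun (st : List (Int × Int) × Int) col =>
        if PySem.List.pyGetD xs col 0 > st.2 then (st.1 ++ [(r, col)], PySem.List.pyGetD xs col 0)
        else st)
      (acc, h)).1
    = acc ++ visRev r xs.reverse h ((xs.length : Int) - 1) := by
  induction xs using List.reverseRecOn with
  | nil =>
    intro acc h
    rw [PySem.List.pyRange_neg_one_eq_nil (by simp)]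
    simp [visRev]
  | append_singleton ys z ih =>
    intro acc h
    have hlen : (((ys ++ [z]).length : Int) - 1) = (ys.length : Int) := by simp
    rw [hlen, PySem.List.pyRange_neg_one_cons (by omega)]
    have hz : PySem.List.pyGetD (ys ++ [z]) ((ys.length : Int)) 0 = z := by
      simp [PySem.List.pyGetD_natCast]
    have key : ∀ col ∈ PySem.List.pyRange ((ys.length : Int) - 1) (-1) (-1),
        PySem.List.pyGetD (ys ++ [z]) col 0 = PySem.List.pyGetD ys col 0 := by
      intro col hc
      rw [PySem.List.mem_pyRange_neg_one] at hc
      rw [PySem.List.pyGetD_eq_getElem _ 0 (by omega) (by simp; omega),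
          PySem.List.pyGetD_eq_getElem _ 0 (by omega) (by omega)]
      exact List.getElem_append_left (by omega)
    simp only [List.foldl_cons, hz, List.reverse_append, List.reverse_singleton,
      List.singleton_append, visRev]
    by_cases hgt : z > h
    · simp only [if_pos hgt, max_eq_right (le_of_lt hgt)]
      rw [PySem.List.foldl_congr_mem (PySem.List.pyRange ((ys.length : Int) - 1) (-1) (-1)) _
        (fun (st : List (Int × Int) × Int) col =>
          if PySem.List.pyGetD ys col 0 > st.2 then (st.1 ++ [(r, col)], PySem.List.pyGetD ys col 0) else st)
        (acc ++ [(r, (ys.length : Int))], z)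
        (fun st col hc => by rw [key col hc])]
      rw [ih]
      simp
    · simp only [if_neg hgt, max_eq_left (not_lt.mp hgt)]
      rw [PySem.List.foldl_congr_mem (PySem.List.pyRange ((ys.length : Int) - 1) (-1) (-1)) _
        (fun (st : List (Int × Int) × Int) col =>
          if PySem.List.pyGetD ys col 0 > st.2 then (st.1 ++ [(r, col)], PySem.List.pyGetD ys col 0) else st)
        (acc, h)
        (fun st col hc => by rw [key col hc])]
      rw [ih]
      simp

lemma innerB (r : Int) (xs : List Int) : ∀ (h : Int),
    ((PySem.List.pyRange ((xs.length : Int) - 1) (-1) (-1)).filter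
        (fun c => PySem.List.pyGetD xs c 0 > PySem.List.pyGetD (xs.reverse.foldl sufF [h]) (c + 1) 0)).map
        (fun c => (r, c))
    = visRev r xs.reverse h ((xs.length : Int) - 1) := by
  induction xs using List.reverseRecOn with
  | nil =>
    intro h
    rw [PySem.List.pyRange_neg_one_eq_nil (by simp)]
    simp [visRev]
  | append_singleton ys z ih =>
    intro h
    have hlen : (((ys ++ [z]).length : Int) - 1) = (ys.length : Int) := by simp
    rw [hlen, PySem.List.pyRange_neg_one_cons (by omega)]
    have hz : PySem.List.pyGetD (ys ++ [z]) ((ys.length : Int)) 0 = z := by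
      simp [PySem.List.pyGetD_natCast]
    have hsuf : (ys ++ [z]).reverse.foldl sufF [h]
        = ys.reverse.foldl sufF [max z h] ++ [h] := by
      rw [List.reverse_append]
      simp only [List.reverse_singleton, List.singleton_append, List.foldl_cons, sufF,
        List.headD_cons]
      exact suf_tail _ _ _
    have hslen : (ys.reverse.foldl sufF [max z h]).length = ys.length + 1 := by
      rw [suf_len]; simp
    have hsufz : PySem.List.pyGetD ((ys ++ [z]).reverse.foldl sufF [h]) ((ys.length : Int) + 1) 0
        = h := by
      rw [hsuf]
      have hc : ((ys.length : Int) + 1) = ((ys.reverse.foldl sufF [max z h]).length : Int) := by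
        rw [hslen]; push_cast; ring
      rw [hc, PySem.List.pyGetD_natCast]
      simp
    have key : ∀ col ∈ PySem.List.pyRange ((ys.length : Int) - 1) (-1) (-1),
        PySem.List.pyGetD (ys ++ [z]) col 0 = PySem.List.pyGetD ys col 0 := by
      intro col hc
      rw [PySem.List.mem_pyRange_neg_one] at hc
      rw [PySem.List.pyGetD_eq_getElem _ 0 (by omega) (by simp; omega),
          PySem.List.pyGetD_eq_getElem _ 0 (by omega) (by omega)]
      exact List.getElem_append_left (by omega)
    have keys : ∀ col ∈ PySem.List.pyRange ((ys.length : Int) - 1) (-1) (-1),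
        PySem.List.pyGetD ((ys ++ [z]).reverse.foldl sufF [h]) (col + 1) 0
          = PySem.List.pyGetD (ys.reverse.foldl sufF [max z h]) (col + 1) 0 := by
      intro col hc
      rw [PySem.List.mem_pyRange_neg_one] at hc
      rw [hsuf, PySem.List.pyGetD_eq_getElem _ 0 (by omega)
            (by rw [List.length_append, hslen]; push_cast; omega),
          PySem.List.pyGetD_eq_getElem _ 0 (by omega) (by rw [hslen]; push_cast; omega)]
      exact List.getElem_append_left (by rw [hslen]; omega)
    rw [List.filter_cons]
    simp only [hz, hsufz]
    rw [List.filter_congr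
      (q := fun c => decide (PySem.List.pyGetD ys c 0 >
        PySem.List.pyGetD (List.foldl sufF [max z h] ys.reverse) (c + 1) 0))
      (fun c hc => by simp only [key c hc, keys c hc])]
    simp only [List.reverse_append, List.reverse_singleton, List.singleton_append, visRev]
    rw [max_comm h z]
    by_cases hgt : z > h
    · simp only [hgt, decide_true, if_true, List.map_cons]
      rw [ih (max z h)]
      simp
    · simp only [hgt, decide_false, Bool.false_eq_true, if_false]
      rw [ih (max z h)]
      simp

theorem right_visible_spec : Claim_equal_right_visible := by
  intro grid _ hpre
  obtain ⟨hne, hrows⟩ := hpre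
  unfold Spec_right_visible right_visible right_visible_alt
  have hW : ((PySem.List.pyGet? grid 0).getD []) = grid.headD [] := by
    cases grid with
    | nil => exact absurd rfl hne
    | cons a l => simp
  rw [PySem.List.enumerate_eq_map_pyRange grid ([] : List Int), List.foldl_map,
    PySem.List.len_eq]
  apply (PySem.List.foldl_congr_mem _ _ _ _ _).symm
  intro acc j hj
  rw [PySem.List.mem_pyRange_one] at hj
  have hmem : PySem.List.pyGetD grid j [] ∈ grid := by
    apply PySem.List.pyGetD_mem
    unfold PySem.Raise.InRange
    omega
  have hWrow : (grid.headD []).length ≤ (PySem.List.pyGetD grid j []).length :=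
    hrows _ hmem
  rw [hW]
  -- name the row and the common prefix
  generalize hrw : PySem.List.pyGetD grid j [] = row at hWrow
  generalize hWd : (grid.headD []).length = W at hWrow
  -- B side: the slice is take
  rw [PySem.List.slice_to_natCast]
  simp only [show (fun (s : List Int) (v : Int) => max v (s.headD (-1)) :: s) = sufF from rfl]
  have htk : ((List.take W row).length : Int) = (W : Int) := by
    simp [List.length_take]; omega
  -- A side: accesses hit only the first W entries
  have keyA : ∀ col ∈ PySem.List.pyRange ((W : Int) - 1) (-1) (-1),
      PySem.List.pyGetD row col 0 = PySem.List.pyGetD (List.take W row) col 0 := by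
    intro col hc
    rw [PySem.List.mem_pyRange_neg_one] at hc
    rw [PySem.List.pyGetD_eq_getElem _ 0 (by omega) (by omega),
        PySem.List.pyGetD_eq_getElem _ 0 (by omega) (by omega)]
    exact (List.getElem_take).symm
  rw [PySem.List.foldl_congr_mem (PySem.List.pyRange ((W : Int) - 1) (-1) (-1)) _
    (fun (st : List (Int × Int) × Int) col =>
      if PySem.List.pyGetD (List.take W row) col 0 > st.2 then
        (st.1 ++ [(j, col)], PySem.List.pyGetD (List.take W row) col 0)
      else st)
    (acc, -1)
    (fun st col hc => by rw [keyA col hc])]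
  rw [show ((W : Int) - 1) = (((List.take W row).length : Int) - 1) by rw [htk]]
  rw [innerA j (List.take W row) acc (-1), innerB j (List.take W row) (-1)]
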